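-- pv_equiv track=rewrite | github.com/dmed256/coding-puzzles | advent_of_code/python/2019/22.py | get_apply_coefficients
-- ===== SOURCE A (Python) =====
-- def get_apply_coefficients(mult, shift, deck_size, applications):
--     base2_mult = mult
--     base2_mults = [mult]
--     base2_shift = 1
--     base2_shifts = [1]
--
--     for i in range(100):
--         base2_shift = (base2_shift + (base2_shift * base2_mult)) % deck_size
--         base2_shifts.append(base2_shift)
--         base2_mult = (base2_mult * base2_mult) % deck_size
--         base2_mults.append(base2_mult)
--
--     def get_shift_coeff(value):
--         coeff = 1
--         for i in range(100):
--             base2 = 1 << i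
--             if value & base2:
--                 coeff = (coeff * base2_mults[i]) % deck_size
--         return coeff
--
--     apply_mult = 1
--     apply_shift = 0
--     shift_position = 0
--     for i in range(100):
--         base2 = 1 << i
--         if applications & base2:
--             apply_mult = (apply_mult * base2_mults[i]) % deck_size
--
--             apply_shift_coeff = get_shift_coeff(shift_position)
--             apply_shift = (apply_shift + (apply_shift_coeff * base2_shifts[i])) % deck_size
--             shift_position += base2
--
--     apply_shift = (shift * apply_shift) % deck_size
--
--     return [apply_mult, apply_shift]
-- ===== SOURCE B (Python) =====
-- def get_apply_coefficients(mult, shift, deck_size, applications):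
--     # Square-and-multiply on affine maps x -> m*x + s, with running accumulators
--     # instead of precomputed coefficient arrays.
--     result_mult = 1
--     result_shift = 0
--     cur_mult = mult
--     cur_shift = shift
--     for i in range(100):
--         if applications & (1 << i):
--             result_shift = (cur_mult * result_shift + cur_shift) % deck_size
--             result_mult = (result_mult * cur_mult) % deck_size
--         cur_shift = (cur_mult * cur_shift + cur_shift) % deck_size
--         cur_mult = (cur_mult * cur_mult) % deck_size
--     return [result_mult, result_shift]
-- ===== Notes on version B (the rewrite author's own statement) =====
-- stated objective: simpler
-- what changed: Replaced A's precomputed base2_mults/base2_shifts arrays and the nested get_shift_coeff product loop (rescanned on every set bit) by a single square-and-multiply pass that composes affine maps with two running accumulators.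
import Mathlib
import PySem

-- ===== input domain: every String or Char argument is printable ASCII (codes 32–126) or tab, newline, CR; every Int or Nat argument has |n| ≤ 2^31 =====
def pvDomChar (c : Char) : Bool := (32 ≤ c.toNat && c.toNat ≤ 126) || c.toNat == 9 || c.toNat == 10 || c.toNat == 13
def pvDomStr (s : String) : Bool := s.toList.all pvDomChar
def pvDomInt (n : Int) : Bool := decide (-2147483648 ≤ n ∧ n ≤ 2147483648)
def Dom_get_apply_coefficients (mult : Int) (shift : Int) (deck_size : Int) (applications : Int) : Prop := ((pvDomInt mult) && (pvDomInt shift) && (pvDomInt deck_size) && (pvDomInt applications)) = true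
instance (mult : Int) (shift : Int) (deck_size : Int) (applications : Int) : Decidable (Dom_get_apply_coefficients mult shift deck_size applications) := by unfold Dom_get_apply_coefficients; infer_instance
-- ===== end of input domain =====

-- B replaces A's precomputed coefficient arrays and nested shift-coefficient product loop by a single
-- square-and-multiply pass over affine-map accumulators (simpler, same 100-iteration truncation).


-- ===== PORT A =====
-- Python list indexing xs[i] is ported as xs.getD i 0: every index used is in range
-- (the lists hold 101 elements, i < 100), so this is exact.
def get_apply_coefficients (mult : Int) (shift : Int) (deck_size : Int) (applications : Int) : List Int :=
  -- first loop: build base2_mults / base2_shifts; state (base2_mult, base2_mults, base2_shift, base2_shifts)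
  let st := (List.range 100).foldl
    (fun (st : Int × List Int × Int × List Int) (_ : Nat) =>
      let bs := PySem.Int.mod (st.2.2.1 + st.2.2.1 * st.1) deck_size
      let bm := PySem.Int.mod (st.1 * st.1) deck_size
      (bm, st.2.1 ++ [bm], bs, st.2.2.2 ++ [bs]))
    (mult, [mult], 1, [1])
  let base2_mults := st.2.1
  let base2_shifts := st.2.2.2
  let get_shift_coeff := fun (value : Int) =>
    (List.range 100).foldl
      (fun (coeff : Int) (i : Nat) =>
        if PySem.Int.band value ((1 : Int) <<< i) ≠ 0 then
          PySem.Int.mod (coeff * base2_mults.getD i 0) deck_size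
        else coeff) 1
  -- main loop: state (apply_mult, apply_shift, shift_position)
  let fin := (List.range 100).foldl
    (fun (st : Int × Int × Int) (i : Nat) =>
      if PySem.Int.band applications ((1 : Int) <<< i) ≠ 0 then
        (PySem.Int.mod (st.1 * base2_mults.getD i 0) deck_size,
         PySem.Int.mod (st.2.1 + get_shift_coeff st.2.2 * base2_shifts.getD i 0) deck_size,
         st.2.2 + (1 : Int) <<< i)
      else st)
    (1, 0, 0)
  [fin.1, PySem.Int.mod (shift * fin.2.1) deck_size]

-- ===== PORT B =====
-- square-and-multiply over affine maps; state (result_mult, result_shift, cur_mult, cur_shift)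
def get_apply_coefficients_alt (mult : Int) (shift : Int) (deck_size : Int) (applications : Int) : List Int :=
  let fin := (List.range 100).foldl
    (fun (st : Int × Int × Int × Int) (i : Nat) =>
      let st' := if PySem.Int.band applications ((1 : Int) <<< i) ≠ 0 then
          (PySem.Int.mod (st.1 * st.2.2.1) deck_size,
           PySem.Int.mod (st.2.2.1 * st.2.1 + st.2.2.2) deck_size)
        else (st.1, st.2.1)
      (st'.1, st'.2,
       PySem.Int.mod (st.2.2.1 * st.2.2.1) deck_size,
       PySem.Int.mod (st.2.2.1 * st.2.2.2 + st.2.2.2) deck_size))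
    (1, 0, mult, shift)
  [fin.1, fin.2.1]

-- ===== PRECONDITION & SPEC =====
-- Pre_ excludes deck_size = 0, where Python A raises ZeroDivisionError (as does B).
def Pre_get_apply_coefficients (mult : Int) (shift : Int) (deck_size : Int) (applications : Int) : Prop :=
  deck_size ≠ 0
instance (mult : Int) (shift : Int) (deck_size : Int) (applications : Int) : Decidable (Pre_get_apply_coefficients mult shift deck_size applications) := by unfold Pre_get_apply_coefficients; infer_instance
def pvWitness_get_apply_coefficients : Int × Int × Int × Int := (2, 3, 10, 7)
def Spec_get_apply_coefficients (mult : Int) (shift : Int) (deck_size : Int) (applications : Int) (out : List Int) : Prop := out = get_apply_coefficients_alt mult shift deck_size applications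
instance (mult : Int) (shift : Int) (deck_size : Int) (applications : Int) (out : List Int) : Decidable (Spec_get_apply_coefficients mult shift deck_size applications out) := by unfold Spec_get_apply_coefficients; infer_instance

-- ===== CLAIM (what is proved, stated in full; the proofs are below) =====
def Claim_equal_get_apply_coefficients : Prop := ∀ (mult : Int) (shift : Int) (deck_size : Int) (applications : Int), Dom_get_apply_coefficients mult shift deck_size applications → Pre_get_apply_coefficients mult shift deck_size applications → Spec_get_apply_coefficients mult shift deck_size applications (get_apply_coefficients mult shift deck_size applications)

-- ===== LEMMAS AND PROOFS =====

-- models of the two programs' loop states, by recursion on the iteration count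
def pvM (mult d : Int) : Nat → Int
  | 0 => mult
  | n+1 => PySem.Int.mod (pvM mult d n * pvM mult d n) d

def pvS (mult d : Int) : Nat → Int
  | 0 => 1
  | n+1 => PySem.Int.mod (pvS mult d n + pvS mult d n * pvM mult d n) d

def pvC (mult shift d : Int) : Nat → Int
  | 0 => shift
  | n+1 => PySem.Int.mod (pvM mult d n * pvC mult shift d n + pvC mult shift d n) d

def pvG (mult d v : Int) : Nat → Int
  | 0 => 1
  | t+1 => if PySem.Int.band v ((1 : Int) <<< t) ≠ 0 then
             PySem.Int.mod (pvG mult d v t * pvM mult d t) d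
           else pvG mult d v t

def pvSp (ap : Int) : Nat → Nat
  | 0 => 0
  | n+1 => pvSp ap n + (if PySem.Int.band ap ((1 : Int) <<< n) ≠ 0 then 2^n else 0)

def pvAm (mult d ap : Int) : Nat → Int
  | 0 => 1
  | n+1 => if PySem.Int.band ap ((1 : Int) <<< n) ≠ 0 then
             PySem.Int.mod (pvAm mult d ap n * pvM mult d n) d
           else pvAm mult d ap n

def pvAsh (mult d ap : Int) : Nat → Int
  | 0 => 0
  | n+1 => if PySem.Int.band ap ((1 : Int) <<< n) ≠ 0 then
             PySem.Int.mod (pvAsh mult d ap n + pvG mult d ((pvSp ap n : Nat) : Int) 100 * pvS mult d n) d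
           else pvAsh mult d ap n

def pvRs (mult shift d ap : Int) : Nat → Int
  | 0 => 0
  | n+1 => if PySem.Int.band ap ((1 : Int) <<< n) ≠ 0 then
             PySem.Int.mod (pvM mult d n * pvRs mult shift d ap n + pvC mult shift d n) d
           else pvRs mult shift d ap n

-- geometric sum  F a = 1 + mult + … + mult^(a-1)
def pvF (mult : Int) : Nat → Int
  | 0 => 0
  | a+1 => pvF mult a + mult^a

lemma pvF_add (mult : Int) (a b : Nat) : pvF mult (a+b) = pvF mult a + mult^a * pvF mult b := by
  induction b with
  | zero => simp [pvF]
  | succ b ih => rw [← Nat.add_assoc]; simp [pvF, ih, pow_add]; ring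

lemma pm_congr {a b d : Int} (h : a ≡ b [ZMOD d]) : PySem.Int.mod a d = PySem.Int.mod b d := by
  obtain ⟨k, hk⟩ := Int.ModEq.dvd h
  have : b = a + d * k := by omega
  simp [PySem.Int.mod, this, Int.add_mul_fmod_self_left]

lemma pm_modEq (a d : Int) : PySem.Int.mod a d ≡ a [ZMOD d] :=
  Int.modEq_iff_dvd.mpr (by simpa [PySem.Int.mod] using (Int.dvd_self_sub_fmod : d ∣ a - Int.fmod a d))

lemma pm_pm (a d : Int) : PySem.Int.mod (PySem.Int.mod a d) d = PySem.Int.mod a d :=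
  pm_congr (pm_modEq a d)

lemma pvM_modEq (mult d : Int) (n : Nat) : pvM mult d n ≡ mult ^ (2^n) [ZMOD d] := by
  induction n with
  | zero => simp [pvM]
  | succ n ih =>
    calc pvM mult d (n+1) ≡ pvM mult d n * pvM mult d n [ZMOD d] := pm_modEq _ d
    _ ≡ mult^(2^n) * mult^(2^n) [ZMOD d] := Int.ModEq.mul ih ih
    _ = mult ^ (2^(n+1)) := by rw [Nat.two_pow_succ, pow_add]

lemma pvS_modEq (mult d : Int) (n : Nat) : pvS mult d n ≡ pvF mult (2^n) [ZMOD d] := by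
  induction n with
  | zero => simp [pvS, pvF]
  | succ n ih =>
    calc pvS mult d (n+1) ≡ pvS mult d n + pvS mult d n * pvM mult d n [ZMOD d] := pm_modEq _ d
    _ ≡ pvF mult (2^n) + pvF mult (2^n) * mult^(2^n) [ZMOD d] :=
        Int.ModEq.add ih (Int.ModEq.mul ih (pvM_modEq mult d n))
    _ = pvF mult (2^(n+1)) := by rw [Nat.two_pow_succ, pvF_add]; ring

lemma pvC_modEq (mult shift d : Int) (n : Nat) : pvC mult shift d n ≡ shift * pvF mult (2^n) [ZMOD d] := by
  induction n with
  | zero => simp [pvC, pvF]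
  | succ n ih =>
    calc pvC mult shift d (n+1) ≡ pvM mult d n * pvC mult shift d n + pvC mult shift d n [ZMOD d] := pm_modEq _ d
    _ ≡ mult^(2^n) * (shift * pvF mult (2^n)) + shift * pvF mult (2^n) [ZMOD d] :=
        Int.ModEq.add (Int.ModEq.mul (pvM_modEq mult d n) ih) ih
    _ = shift * pvF mult (2^(n+1)) := by rw [Nat.two_pow_succ, pvF_add]; ring

-- the Python truth test 'value & (1 << t)' on a nonnegative value is the t-th bit
lemma band_two_pow_nat (v t : Nat) :
    (PySem.Int.band ((v : Nat) : Int) ((1 : Int) <<< t) ≠ 0) ↔ v.testBit t = true := by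
  have h1 : ((1 : Int) <<< t) = (((2^t : Nat) : Int)) := by
    rw [Int.shiftLeft_eq]; push_cast; ring
  rw [h1, PySem.Int.band_natCast, Nat.and_two_pow]
  cases h : v.testBit t <;> simp

lemma pvG_modEq (mult d : Int) (v t : Nat) : pvG mult d ((v : Nat) : Int) t ≡ mult ^ (v % 2^t) [ZMOD d] := by
  induction t with
  | zero => simp [pvG, Nat.mod_one]
  | succ t ih =>
    have hsplit : v % 2^(t+1) = v % 2^t + 2^t * (v / 2^t % 2) := by
      rw [pow_succ]; exact Nat.mod_mul
    rw [pvG]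
    by_cases hb : v.testBit t = true
    · rw [if_pos ((band_two_pow_nat v t).2 hb)]
      have hd : v / 2^t % 2 = 1 := by
        have h2 : v.testBit t = decide (v / 2^t % 2 = 1) := Nat.testBit_eq_decide_div_mod_eq
        rw [hb] at h2; exact of_decide_eq_true h2.symm
      calc PySem.Int.mod (pvG mult d ((v:Nat):Int) t * pvM mult d t) d
          ≡ pvG mult d ((v:Nat):Int) t * pvM mult d t [ZMOD d] := pm_modEq _ d
        _ ≡ mult ^ (v % 2^t) * mult ^ (2^t) [ZMOD d] := Int.ModEq.mul ih (pvM_modEq mult d t)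
        _ = mult ^ (v % 2^(t+1)) := by rw [hsplit, hd, pow_add]; ring_nf
    · rw [if_neg (fun h => hb ((band_two_pow_nat v t).1 h))]
      have hd : v / 2^t % 2 = 0 := by
        have hb' : v.testBit t = false := by revert hb; cases v.testBit t <;> simp
        have h2 : v.testBit t = decide (v / 2^t % 2 = 1) := Nat.testBit_eq_decide_div_mod_eq
        rw [hb'] at h2
        have := of_decide_eq_false h2.symm
        omega
      rw [hsplit, hd]; simpa using ih

lemma pvSp_lt (ap : Int) (n : Nat) : pvSp ap n < 2^n := by
  induction n with
  | zero => simp [pvSp]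
  | succ n ih => rw [pvSp, Nat.two_pow_succ]; split <;> omega

lemma pvAsh_modEq (mult d ap : Int) (n : Nat) (hn : n ≤ 100) :
    pvAsh mult d ap n ≡ pvF mult (pvSp ap n) [ZMOD d] := by
  induction n with
  | zero => simp [pvAsh, pvSp, pvF]
  | succ n ih =>
    have ih := ih (by omega)
    rw [pvAsh, pvSp]
    split
    · rename_i hb
      have hlt : pvSp ap n < 2^100 :=
        lt_of_lt_of_le (pvSp_lt ap n) (Nat.pow_le_pow_right (by norm_num) (by omega))
      have hg : pvG mult d ((pvSp ap n : Nat) : Int) 100 ≡ mult ^ (pvSp ap n) [ZMOD d] := by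
        have := pvG_modEq mult d (pvSp ap n) 100
        rwa [Nat.mod_eq_of_lt hlt] at this
      calc PySem.Int.mod (pvAsh mult d ap n + pvG mult d ((pvSp ap n : Nat) : Int) 100 * pvS mult d n) d
          ≡ pvAsh mult d ap n + pvG mult d ((pvSp ap n : Nat) : Int) 100 * pvS mult d n [ZMOD d] := pm_modEq _ d
        _ ≡ pvF mult (pvSp ap n) + mult ^ (pvSp ap n) * pvF mult (2^n) [ZMOD d] :=
            Int.ModEq.add ih (Int.ModEq.mul hg (pvS_modEq mult d n))
        _ = pvF mult (pvSp ap n + 2^n) := (pvF_add mult _ _).symm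
    · simpa using ih

lemma pvRs_modEq (mult shift d ap : Int) (n : Nat) :
    pvRs mult shift d ap n ≡ shift * pvF mult (pvSp ap n) [ZMOD d] := by
  induction n with
  | zero => simp [pvRs, pvSp, pvF]
  | succ n ih =>
    rw [pvRs, pvSp]
    split
    · calc PySem.Int.mod (pvM mult d n * pvRs mult shift d ap n + pvC mult shift d n) d
          ≡ pvM mult d n * pvRs mult shift d ap n + pvC mult shift d n [ZMOD d] := pm_modEq _ d
        _ ≡ mult^(2^n) * (shift * pvF mult (pvSp ap n)) + shift * pvF mult (2^n) [ZMOD d] :=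
            Int.ModEq.add (Int.ModEq.mul (pvM_modEq mult d n) ih) (pvC_modEq mult shift d n)
        _ = shift * pvF mult (2^n + pvSp ap n) := by rw [pvF_add]; ring
        _ = shift * pvF mult (pvSp ap n + 2^n) := by rw [Nat.add_comm]
    · simpa using ih

lemma pvRs_fix (mult shift d ap : Int) (n : Nat) :
    PySem.Int.mod (pvRs mult shift d ap n) d = pvRs mult shift d ap n := by
  induction n with
  | zero => simp [pvRs, PySem.Int.mod, Int.zero_fmod]
  | succ n ih =>
    rw [pvRs]
    split
    · exact pm_pm _ d
    · exact ih

-- bridging the ports' folds to the models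
lemma foldA1 (mult d : Int) (n : Nat) :
    (List.range n).foldl
      (fun (st : Int × List Int × Int × List Int) (_ : Nat) =>
        let bs := PySem.Int.mod (st.2.2.1 + st.2.2.1 * st.1) d
        let bm := PySem.Int.mod (st.1 * st.1) d
        (bm, st.2.1 ++ [bm], bs, st.2.2.2 ++ [bs]))
      (mult, [mult], 1, [1])
    = (pvM mult d n, (List.range (n+1)).map (pvM mult d), pvS mult d n, (List.range (n+1)).map (pvS mult d)) := by
  induction n with
  | zero => simp [pvM, pvS]
  | succ n ih =>
    rw [List.range_succ, List.foldl_append, ih]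
    simp [List.range_succ, pvM, pvS]

lemma foldG (mult d v : Int) (t : Nat) (ht : t ≤ 100) :
    (List.range t).foldl
      (fun (coeff : Int) (i : Nat) =>
        if PySem.Int.band v ((1 : Int) <<< i) ≠ 0 then
          PySem.Int.mod (coeff * ((List.range 101).map (pvM mult d)).getD i 0) d
        else coeff) 1
    = pvG mult d v t := by
  induction t with
  | zero => simp [pvG]
  | succ t ih =>
    rw [show List.range (t+1) = List.range t ++ [t] from List.range_succ, List.foldl_append, ih (by omega)]
    simp only [List.foldl_cons, List.foldl_nil,
      PySem.List.getD_map_range (pvM mult d) 101 t 0 (by omega)]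
    rw [pvG]

lemma foldAmain (mult d ap : Int) (n : Nat) (hn : n ≤ 100) :
    (List.range n).foldl
      (fun (st : Int × Int × Int) (i : Nat) =>
        if PySem.Int.band ap ((1 : Int) <<< i) ≠ 0 then
          (PySem.Int.mod (st.1 * ((List.range 101).map (pvM mult d)).getD i 0) d,
           PySem.Int.mod (st.2.1 +
             ((List.range 100).foldl
               (fun (coeff : Int) (j : Nat) =>
                 if PySem.Int.band st.2.2 ((1 : Int) <<< j) ≠ 0 then
                   PySem.Int.mod (coeff * ((List.range 101).map (pvM mult d)).getD j 0) d
                 else coeff) 1) * ((List.range 101).map (pvS mult d)).getD i 0) d,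
           st.2.2 + (1 : Int) <<< i)
        else st)
      (1, 0, 0)
    = (pvAm mult d ap n, pvAsh mult d ap n, ((pvSp ap n : Nat) : Int)) := by
  induction n with
  | zero => simp [pvAm, pvAsh, pvSp]
  | succ n ih =>
    rw [show List.range (n+1) = List.range n ++ [n] from List.range_succ, List.foldl_append, ih (by omega)]
    simp only [List.foldl_cons, List.foldl_nil, pvAm, pvAsh, pvSp,
      PySem.List.getD_map_range (pvM mult d) 101 n 0 (by omega),
      PySem.List.getD_map_range (pvS mult d) 101 n 0 (by omega),
      foldG mult d ((pvSp ap n : Nat) : Int) 100 (by omega)]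
    split
    · have hsh : ((1 : Int) <<< n) = (((2^n : Nat) : Int)) := by
        rw [Int.shiftLeft_eq]; push_cast; ring
      simp [hsh]
    · rfl

lemma foldB (mult shift d ap : Int) (n : Nat) :
    (List.range n).foldl
      (fun (st : Int × Int × Int × Int) (i : Nat) =>
        let st' := if PySem.Int.band ap ((1 : Int) <<< i) ≠ 0 then
            (PySem.Int.mod (st.1 * st.2.2.1) d,
             PySem.Int.mod (st.2.2.1 * st.2.1 + st.2.2.2) d)
          else (st.1, st.2.1)
        (st'.1, st'.2,
         PySem.Int.mod (st.2.2.1 * st.2.2.1) d,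
         PySem.Int.mod (st.2.2.1 * st.2.2.2 + st.2.2.2) d))
      (1, 0, mult, shift)
    = (pvAm mult d ap n, pvRs mult shift d ap n, pvM mult d n, pvC mult shift d n) := by
  induction n with
  | zero => simp [pvAm, pvRs, pvM, pvC]
  | succ n ih =>
    rw [List.range_succ, List.foldl_append, ih]
    simp only [List.foldl_cons, List.foldl_nil, pvAm, pvRs, pvM, pvC]
    split <;> rfl

-- ===== VERDICT (by name: the statement is the Claim_ definition above) =====
theorem get_apply_coefficients_spec : Claim_equal_get_apply_coefficients := by
  intro mult shift d ap _ _
  have hfinal : PySem.Int.mod (shift * pvAsh mult d ap 100) d = pvRs mult shift d ap 100 := by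
    rw [← pvRs_fix mult shift d ap 100]
    exact pm_congr (Int.ModEq.trans
      (Int.ModEq.mul_left shift (pvAsh_modEq mult d ap 100 (by omega)))
      (pvRs_modEq mult shift d ap 100).symm)
  unfold Spec_get_apply_coefficients
  simp only [get_apply_coefficients, get_apply_coefficients_alt, foldA1, foldB,
    foldAmain mult d ap 100 (by omega), hfinal]
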